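-- pv_equiv track=rewrite | github.com/valates/dotapick | nameFormater.py | properFormatName
-- ===== SOURCE A (Python) =====
-- def properFormatName(heroname):
-- 	properHero = ''
-- 	for i in range(0, len(heroname)):
-- 		if ((i == 0) or (heroname[(i - 1)] == ' ') or (heroname[(i - 1)] == '-')):
-- 			properHero += heroname[i].capitalize()
-- 		else:
-- 			properHero += heroname[i]
-- 	properHero = properHero.replace("Of", "of")
-- 	properHero = properHero.replace("The", "the")
-- 	return prophetFix(properHero)
--
-- def prophetFix(heroname):
-- 	return heroname.replace("Natures", "Nature's")
-- ===== SOURCE B (Python) =====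
-- def properFormatName(heroname):
--     tokens = []
--     cur = ''
--     for ch in heroname:
--         if ch == ' ' or ch == '-':
--             tokens.append(cur)
--             tokens.append(ch)
--             cur = ''
--         else:
--             cur += ch
--     tokens.append(cur)
--     s = ''.join(t[:1].capitalize() + t[1:] for t in tokens)
--     s = s.replace("Of", "of").replace("The", "the")
--     return s.replace("Natures", "Nature's")
-- ===== Notes on version B (the rewrite author's own statement) =====
-- stated objective: idiomatic
-- what changed: Replaced the index loop that inspects heroname[i-1] and builds the result with per-character string += by a tokenization into runs and delimiter pieces, capitalizing each piece's first character and joining once, with the same final replaces.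
import Mathlib
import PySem

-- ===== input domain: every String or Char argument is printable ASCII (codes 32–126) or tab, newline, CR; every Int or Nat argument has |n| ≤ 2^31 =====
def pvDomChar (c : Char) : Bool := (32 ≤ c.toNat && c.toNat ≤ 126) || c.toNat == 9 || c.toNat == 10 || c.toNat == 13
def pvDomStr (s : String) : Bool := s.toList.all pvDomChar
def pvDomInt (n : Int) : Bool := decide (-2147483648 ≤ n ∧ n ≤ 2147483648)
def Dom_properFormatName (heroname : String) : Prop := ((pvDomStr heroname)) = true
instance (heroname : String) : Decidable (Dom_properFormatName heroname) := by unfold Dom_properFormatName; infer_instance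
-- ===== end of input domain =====

-- B tokenizes into runs and delimiter pieces and capitalizes each piece's first character (idiomatic decomposition); A's index loop is kept literal in its port.
-- .capitalize() on a one-character piece is ported as PySem.Chars.upperChar (identical on the ASCII domain).

-- ===== PORT A =====
def properFormatName (heroname : String) : String :=
  let s := heroname.toList
  let properHero := (PySem.List.pyRange 0 (s.length) 1).foldl
    (fun acc i =>
      if i == 0 || PySem.List.pyGetD s (i - 1) ' ' == ' ' || PySem.List.pyGetD s (i - 1) ' ' == '-'
      then acc ++ [PySem.Chars.upperChar (PySem.List.pyGetD s i ' ')]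
      else acc ++ [PySem.List.pyGetD s i ' ']) []
  let p1 := PySem.Chars.replace properHero "Of".toList "of".toList
  let p2 := PySem.Chars.replace p1 "The".toList "the".toList
  String.ofList (PySem.Chars.replace p2 "Natures".toList "Nature's".toList)

-- ===== PORT B =====
def pvCapFirst : List Char → List Char
  | [] => []
  | c :: r => PySem.Chars.upperChar c :: r

def properFormatName_alt (heroname : String) : String :=
  let st := heroname.toList.foldl
    (fun (st : List (List Char) × List Char) ch =>
      if ch == ' ' || ch == '-' then (st.1 ++ [st.2] ++ [[ch]], ([] : List Char))
      else (st.1, st.2 ++ [ch])) ([], [])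
  let tokens := st.1 ++ [st.2]
  let s := (tokens.map pvCapFirst).flatten
  let s1 := PySem.Chars.replace s "Of".toList "of".toList
  let s2 := PySem.Chars.replace s1 "The".toList "the".toList
  String.ofList (PySem.Chars.replace s2 "Natures".toList "Nature's".toList)

-- ===== PRECONDITION & SPEC =====
def Spec_properFormatName (heroname : String) (out : String) : Prop := out = properFormatName_alt heroname
instance (heroname : String) (out : String) : Decidable (Spec_properFormatName heroname out) := by unfold Spec_properFormatName; infer_instance

-- ===== CLAIM (what is proved, stated in full; the proofs are below) =====
def Claim_equal_properFormatName : Prop := ∀ (heroname : String), Dom_properFormatName heroname → Spec_properFormatName heroname (properFormatName heroname)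

-- ===== LEMMAS AND PROOFS =====

-- canonical form: capitalize a char iff the flag is set (start / just after a delimiter)
def pvRun (b : Bool) : List Char → List Char
  | [] => []
  | c :: r =>
    if c == ' ' || c == '-' then c :: pvRun true r
    else (if b then PySem.Chars.upperChar c else c) :: pvRun false r

lemma pvUpper_delim (c : Char) (h : (c == ' ' || c == '-') = true) :
    PySem.Chars.upperChar c = c := by
  rcases Bool.or_eq_true_iff.mp h with h | h
  · simp [eq_of_beq h]; decide
  · simp [eq_of_beq h]; decide

-- A's per-index value, for positions ≥ 1, as a structural recursion
lemma pvA_tail (r : List Char) : ∀ (p : Char),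
    (List.range r.length).map (fun k =>
      if ((p :: r).getD k ' ' == ' ' || (p :: r).getD k ' ' == '-')
      then PySem.Chars.upperChar (r.getD k ' ') else r.getD k ' ')
    = pvRun (p == ' ' || p == '-') r := by
  induction r with
  | nil => intro p; simp [pvRun]
  | cons c r ih =>
    intro p
    rw [List.length_cons, List.range_succ_eq_map]
    simp only [List.map_cons, List.map_map]
    have htail : ((List.range r.length).map
        ((fun k => if ((p :: c :: r).getD k ' ' == ' ' || (p :: c :: r).getD k ' ' == '-')
          then PySem.Chars.upperChar ((c :: r).getD k ' ') else (c :: r).getD k ' ') ∘ Nat.succ))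
        = pvRun (c == ' ' || c == '-') r := by
      rw [← ih c]; apply List.map_congr_left; intro k _; rfl
    rw [htail]
    by_cases hc : (c == ' ' || c == '-') = true
    · simp only [pvRun, hc, List.getD_cons_zero]
      by_cases hp : (p == ' ' || p == '-') = true
      · simp [hp, pvUpper_delim c hc]
      · simp at hp
        simp [hp]
    · simp only [Bool.not_eq_true] at hc
      simp only [pvRun, hc, List.getD_cons_zero]
      by_cases hp : (p == ' ' || p == '-') = true
      · simp [hp]
      · simp only [Bool.not_eq_true] at hp
        simp [hp]

lemma pvA_run (s : List Char) :
    (PySem.List.pyRange 0 (s.length) 1).foldl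
      (fun acc i =>
        if i == 0 || PySem.List.pyGetD s (i - 1) ' ' == ' ' || PySem.List.pyGetD s (i - 1) ' ' == '-'
        then acc ++ [PySem.Chars.upperChar (PySem.List.pyGetD s i ' ')]
        else acc ++ [PySem.List.pyGetD s i ' ']) []
    = pvRun true s := by
  have hif : (fun (acc : List Char) (i : Int) =>
      if i == 0 || PySem.List.pyGetD s (i - 1) ' ' == ' ' || PySem.List.pyGetD s (i - 1) ' ' == '-'
      then acc ++ [PySem.Chars.upperChar (PySem.List.pyGetD s i ' ')]
      else acc ++ [PySem.List.pyGetD s i ' '])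
      = (fun acc i => acc ++ [if i == 0 || PySem.List.pyGetD s (i - 1) ' ' == ' ' || PySem.List.pyGetD s (i - 1) ' ' == '-'
        then PySem.Chars.upperChar (PySem.List.pyGetD s i ' ') else PySem.List.pyGetD s i ' ']) := by
    funext acc i; split <;> rfl
  rw [hif, PySem.List.foldl_append_singleton_eq_map, PySem.List.pyRange_one]
  simp only [List.nil_append, zero_add, sub_zero, Int.toNat_natCast, List.map_map]
  cases s with
  | nil => simp [pvRun]
  | cons c r =>
    rw [List.length_cons, List.range_succ_eq_map]
    simp only [List.map_cons, List.map_map, Function.comp_apply, Nat.cast_zero]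
    have h0 : ((0 : Int) == 0 || PySem.List.pyGetD (c :: r) ((0:Int) - 1) ' ' == ' '
        || PySem.List.pyGetD (c :: r) ((0:Int) - 1) ' ' == '-') = true := by simp
    rw [if_pos h0]
    have hget0 : PySem.List.pyGetD (c :: r) (0 : Int) ' ' = c := by
      simp [PySem.List.pyGetD, PySem.List.pyGet?, PySem.List.pyIdx?]
    rw [hget0]
    have htail : ∀ (F : Nat → Char)
        (hF : ∀ k, F k = (if ((c :: r).getD k ' ' == ' ' || (c :: r).getD k ' ' == '-')
          then PySem.Chars.upperChar (r.getD k ' ') else r.getD k ' ')),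
        (List.range r.length).map F = pvRun (c == ' ' || c == '-') r := by
      intro F hF
      rw [← pvA_tail r c]
      apply List.map_congr_left; intro k _; rw [hF k]
    rw [htail _ (fun k => by
      have h1 : ((Nat.succ k : Int) == 0) = false := by
        rw [beq_eq_false_iff_ne]; push_cast; omega
      have h2 : (Nat.succ k : Int) - 1 = (k : Int) := by push_cast; ring
      have h3 : PySem.List.pyGetD (c :: r) (Nat.succ k : Int) ' ' = r.getD k ' ' := by
        have e : (Nat.succ k : Int) = ((k + 1 : Nat) : Int) := by push_cast; ring
        rw [e, PySem.List.pyGetD_natCast, List.getD_cons_succ]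
      simp only [Function.comp_apply, h1, h2, h3, Bool.false_or, PySem.List.pyGetD_natCast])]
    by_cases hc : (c == ' ' || c == '-') = true
    · simp [pvRun, hc, pvUpper_delim c hc]
    · simp only [Bool.not_eq_true] at hc
      simp [pvRun, hc]

-- B's fold invariant
lemma pvB_inv (s : List Char) : ∀ (toks : List (List Char)) (cur : List Char),
    (((s.foldl (fun (st : List (List Char) × List Char) ch =>
        if ch == ' ' || ch == '-' then (st.1 ++ [st.2] ++ [[ch]], ([] : List Char))
        else (st.1, st.2 ++ [ch])) (toks, cur)).1
      ++ [(s.foldl (fun (st : List (List Char) × List Char) ch =>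
        if ch == ' ' || ch == '-' then (st.1 ++ [st.2] ++ [[ch]], ([] : List Char))
        else (st.1, st.2 ++ [ch])) (toks, cur)).2]).map pvCapFirst).flatten
    = (toks.map pvCapFirst).flatten ++ pvCapFirst cur ++ pvRun cur.isEmpty s := by
  induction s with
  | nil => intro toks cur; simp [pvRun]
  | cons c s ih =>
    intro toks cur
    simp only [List.foldl_cons]
    by_cases hc : (c == ' ' || c == '-') = true
    · rw [if_pos hc, ih]
      simp [List.map_append, pvRun, hc, pvCapFirst, pvUpper_delim c hc]
    · simp only [Bool.not_eq_true] at hc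
      rw [if_neg (by simp [hc]), ih]
      have hcap : pvCapFirst (cur ++ [c]) = pvCapFirst cur ++ [if cur.isEmpty then PySem.Chars.upperChar c else c] := by
        cases cur <;> simp [pvCapFirst]
      rw [hcap]
      cases cur <;> simp [pvRun, hc]

-- ===== VERDICT (by name: the statement is the Claim_ definition above) =====
theorem properFormatName_spec : Claim_equal_properFormatName := by
  intro heroname _
  show properFormatName heroname = properFormatName_alt heroname
  unfold properFormatName properFormatName_alt
  have hA := pvA_run heroname.toList
  have hB := pvB_inv heroname.toList [] []
  simp only at hA hB ⊢
  rw [hA, hB]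
  simp [pvCapFirst]
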